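-- pv_equiv track=rewrite | github.com/mlflow/mlflow | mlflow/utils/jsonpath_utils.py | split_path_respecting_backticks
-- ===== SOURCE A (Python) =====
-- def split_path_respecting_backticks(path: str) -> list[str]:
--     """
--     Split path on dots, but keep backticked segments intact.
--
--     Args:
--         path: Path string like 'info.tags.`mlflow.traceName`'
--
--     Returns:
--         List of path segments, e.g., ['info', 'tags', 'mlflow.traceName']
--     """
--     parts = []
--     i = 0
--     current = ""
--
--     while i < len(path):
--         if i < len(path) and path[i] == "`":
--             # Start of backticked segment - read until closing backtick
--             i += 1  # Skip opening backtick
--             while i < len(path) and path[i] != "`":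
--                 current += path[i]
--                 i += 1
--             if i < len(path):
--                 i += 1  # Skip closing backtick
--         elif path[i] == ".":
--             if current:
--                 parts.append(current)
--                 current = ""
--             i += 1
--         else:
--             current += path[i]
--             i += 1
--
--     if current:
--         parts.append(current)
--
--     return parts
-- ===== SOURCE B (Python) =====
-- def split_path_respecting_backticks(path: str) -> list[str]:
--     parts = []
--     current = ""
--     in_backticks = False
--     for ch in path:
--         if ch == "`":
--             in_backticks = not in_backticks
--         elif ch == "." and not in_backticks:
--             if current:
--                 parts.append(current)
--                 current = ""
--         else:
--             current += ch
--     if current: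
--         parts.append(current)
--     return parts
-- ===== Notes on version B (the rewrite author's own statement) =====
-- stated objective: simpler
-- what changed: Replaces A's index-based outer loop with a nested backtick-consuming inner loop by a single for-each-character pass carrying an in_backticks boolean flag.
import Mathlib
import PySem

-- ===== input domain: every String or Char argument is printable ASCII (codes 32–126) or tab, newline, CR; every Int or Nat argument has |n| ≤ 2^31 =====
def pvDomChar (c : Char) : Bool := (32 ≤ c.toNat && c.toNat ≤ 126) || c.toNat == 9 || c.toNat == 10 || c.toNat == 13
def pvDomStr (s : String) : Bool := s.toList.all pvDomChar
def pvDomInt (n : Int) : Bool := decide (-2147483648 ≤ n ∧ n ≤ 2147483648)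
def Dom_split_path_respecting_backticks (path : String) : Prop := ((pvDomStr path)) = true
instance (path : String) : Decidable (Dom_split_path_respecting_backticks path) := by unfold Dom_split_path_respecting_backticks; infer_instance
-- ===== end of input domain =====

-- B replaces A's index-based outer loop with nested backtick-consuming inner loop
-- by a single for-each-character pass carrying an in_backticks boolean flag (objective: simpler).

-- ===== PORT A =====
-- Inner while loop: 'while i < len(path) and path[i] != "`": current += path[i]; i += 1'
-- followed by 'if i < len(path): i += 1'.  Since i only advances, the loop over the
-- index i is transcribed as structural recursion over the remaining character list.
def pvAInner : List Char → String → (List Char × String)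
  | [], current => ([], current)
  | c :: rest, current =>
    if c = '`' then (rest, current)          -- stop, skip closing backtick
    else pvAInner rest (current.push c)

theorem pvAInner_len (l : List Char) (cur : String) : (pvAInner l cur).1.length ≤ l.length := by
  induction l generalizing cur with
  | nil => simp [pvAInner]
  | cons c rest ih =>
    by_cases h : c = '`' <;> simp [pvAInner, h]
    exact Nat.le_succ_of_le (ih _)

-- Outer while loop of A, same state (parts, current), same branch order.
def pvAOuter : List Char → List String → String → List String
  | [], parts, current => if current ≠ "" then parts ++ [current] else parts
  | c :: rest, parts, current =>
    if c = '`' then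
      let r := pvAInner rest current
      pvAOuter r.1 parts r.2
    else if c = '.' then
      pvAOuter rest (if current ≠ "" then parts ++ [current] else parts)
                    (if current ≠ "" then "" else current)
    else
      pvAOuter rest parts (current.push c)
termination_by l => l.length
decreasing_by
  · exact Nat.lt_succ_of_le (pvAInner_len rest current)
  · simp
  · simp

def split_path_respecting_backticks (path : String) : List String :=
  pvAOuter path.toList [] ""

-- ===== PORT B =====
-- One step of B's 'for ch in path' loop; state (parts, current, in_backticks).
def pvBStep (st : List String × String × Bool) (ch : Char) : List String × String × Bool :=
  let (parts, current, inBT) := st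
  if ch = '`' then (parts, current, !inBT)
  else if ch = '.' ∧ inBT = false then
    (if current ≠ "" then parts ++ [current] else parts,
     if current ≠ "" then "" else current, inBT)
  else (parts, current.push ch, inBT)

def split_path_respecting_backticks_alt (path : String) : List String :=
  let st := path.toList.foldl pvBStep ([], "", false)
  if st.2.1 ≠ "" then st.1 ++ [st.2.1] else st.1

-- ===== PRECONDITION & SPEC =====
def Spec_split_path_respecting_backticks (path : String) (out : List String) : Prop := out = split_path_respecting_backticks_alt path
instance (path : String) (out : List String) : Decidable (Spec_split_path_respecting_backticks path out) := by unfold Spec_split_path_respecting_backticks; infer_instance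

-- ===== CLAIM (what is proved, stated in full; the proofs are below) =====
def Claim_equal_split_path_respecting_backticks : Prop := ∀ (path : String), Dom_split_path_respecting_backticks path → Spec_split_path_respecting_backticks path (split_path_respecting_backticks path)

-- ===== LEMMAS AND PROOFS =====

def pvFinish (st : List String × String × Bool) : List String :=
  if st.2.1 ≠ "" then st.1 ++ [st.2.1] else st.1

-- B's fold in the in-backticks state does what A's inner loop does: it copies
-- characters until the closing backtick, then returns to the normal state
-- (when no closing backtick exists, the flags differ but pvFinish ignores the flag).
theorem pvInner_fold (l : List Char) (parts : List String) (cur : String) :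
    pvFinish (l.foldl pvBStep (parts, cur, true))
      = pvFinish ((pvAInner l cur).1.foldl pvBStep (parts, (pvAInner l cur).2, false)) := by
  induction l generalizing cur with
  | nil => simp [pvAInner, pvFinish]
  | cons c rest ih =>
    by_cases h : c = '`'
    · simp [pvAInner, pvBStep, h]
    · simp [pvAInner, pvBStep, h, ih]

theorem pvOuter_fold (n : Nat) (l : List Char) (parts : List String) (cur : String)
    (hn : l.length ≤ n) :
    pvAOuter l parts cur = pvFinish (l.foldl pvBStep (parts, cur, false)) := by
  induction n generalizing l parts cur with
  | zero =>
    have : l = [] := List.eq_nil_of_length_eq_zero (Nat.le_zero.mp hn)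
    subst this; simp [pvAOuter, pvFinish]
  | succ n ih =>
    cases l with
    | nil => simp [pvAOuter, pvFinish]
    | cons c rest =>
      simp only [List.length_cons, Nat.succ_le_succ_iff] at hn
      by_cases h : c = '`'
      · subst h
        simp only [pvAOuter, List.foldl_cons, pvBStep]
        rw [ih _ _ _ (le_trans (pvAInner_len rest cur) hn)]
        simpa using (pvInner_fold rest parts cur).symm
      · by_cases hd : c = '.'
        · subst hd
          simp only [pvAOuter, h, List.foldl_cons]
          rw [ih _ _ _ hn]
          simp [pvBStep, h]
        · simp only [pvAOuter, h, hd, List.foldl_cons]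
          simp only [pvBStep, h, hd, false_and, if_false]
          exact ih _ _ _ hn

-- ===== VERDICT (by name: the statement is the Claim_ definition above) =====
theorem split_path_respecting_backticks_spec : Claim_equal_split_path_respecting_backticks := by
  intro path _
  show split_path_respecting_backticks path = split_path_respecting_backticks_alt path
  unfold split_path_respecting_backticks split_path_respecting_backticks_alt
  rw [pvOuter_fold path.toList.length _ _ _ (le_refl _)]
  rfl
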